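-- pv_equiv track=rewrite | github.com/harounathiam2005/compsci-201-ht | Check.py | check
-- ===== SOURCE A (Python) =====
-- def check(word):
--     value = ''
--     str = word
--
--     while True:
--         for i in range(len(str)):
--             current = str[i:i+2]
--             if current == 'pi':
--                 str = str.replace('pi', '')
--             elif current == 'ka':
--                 str = str.replace('ka', '')
--         if 'pi' in str or 'ka' in str:
--             continue
--         else:
--             break
--
--     while True:
--         for i in range(len(str)):
--             current = str[i:i+3]
--             if current == 'chu':
--                 str = str.replace('chu', '')
--         if 'chu' in str:
--             continue
--         else:
--             break
--
--     if len(str) == 0: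
--         return "YES"
--     else:
--         return "NO"
-- ===== SOURCE B (Python) =====
-- def check(word):
--     st = []
--     for ch in word:
--         if ch == 'i' and st and st[-1] == 'p':
--             st.pop()
--         elif ch == 'a' and st and st[-1] == 'k':
--             st.pop()
--         else:
--             st.append(ch)
--     st2 = []
--     for ch in st:
--         if ch == 'u' and len(st2) >= 2 and st2[-1] == 'h' and st2[-2] == 'c':
--             st2.pop()
--             st2.pop()
--         else:
--             st2.append(ch)
--     return "YES" if not st2 else "NO"
-- ===== Notes on version B (the rewrite author's own statement) =====
-- stated objective: faster
-- what changed: A repeatedly rescans and rebuilds the whole string with str.replace inside nested while/for loops until no 'pi'/'ka' (then 'chu') remains; B makes two single linear stack passes that cancel 'pi'/'ka' and then 'chu' as adjacent-token reductions.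
import Mathlib
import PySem

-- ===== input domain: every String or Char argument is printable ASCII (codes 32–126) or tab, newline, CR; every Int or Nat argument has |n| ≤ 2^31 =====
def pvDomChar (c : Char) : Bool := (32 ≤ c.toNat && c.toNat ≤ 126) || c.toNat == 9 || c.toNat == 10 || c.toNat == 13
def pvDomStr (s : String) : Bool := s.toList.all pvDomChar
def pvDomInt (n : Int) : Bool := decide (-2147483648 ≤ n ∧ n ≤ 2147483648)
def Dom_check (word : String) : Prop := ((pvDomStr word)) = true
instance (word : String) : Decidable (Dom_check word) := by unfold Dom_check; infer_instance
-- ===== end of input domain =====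

-- B replaces A's repeated full-string str.replace scans (quadratic) by two single-pass
-- stack cancellations (pi/ka, then chu); objective: faster (asymptotic, O(n)).


-- ===== PORT A =====
-- A-side helpers: the body of the inner `for i in range(len(str))` loops, and the
-- length lemmas the `while True` loops need for termination (cited in decreasing_by).

-- body of the first for loop: current = str[i:i+2]; replace 'pi' / 'ka' by ''
def pvBody1 (st : List Char) (i : Int) : List Char :=
  -- current = str[i:i+2]
  if PySem.List.slice st (some i) (some (i + 2)) = ['p', 'i'] then
    PySem.Chars.replace st ['p', 'i'] []
  else if PySem.List.slice st (some i) (some (i + 2)) = ['k', 'a'] then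
    PySem.Chars.replace st ['k', 'a'] []
  else st

-- body of the second for loop: current = str[i:i+3]; replace 'chu' by ''
def pvBody2 (st : List Char) (i : Int) : List Char :=
  -- current = str[i:i+3]
  if PySem.List.slice st (some i) (some (i + 3)) = ['c', 'h', 'u'] then
    PySem.Chars.replace st ['c', 'h', 'u'] []
  else st

-- one pass of the first for loop over range(len(str))
def pvPass1 (str : List Char) : List Char :=
  (PySem.List.pyRange 0 str.length 1).foldl pvBody1 str

def pvPass2 (str : List Char) : List Char :=
  (PySem.List.pyRange 0 str.length 1).foldl pvBody2 str

-- a slice of a list is an infix of it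
theorem pvSliceInfix {α : Type} (xs : List α) (a b : Int) :
    PySem.List.slice xs (some a) (some b) <:+: xs := by
  simp only [PySem.List.slice]
  exact (List.take_prefix _ _).isInfix.trans (List.drop_suffix _ _).isInfix

-- the window at the start position of a known occurrence is that occurrence
theorem pvSliceAt (u w v : List Char) :
    PySem.List.slice (u ++ w ++ v) (some (u.length : Int))
      (some ((u.length : Int) + (w.length : Int))) = w := by
  rw [PySem.List.slice_natCast_add, List.append_assoc, List.drop_left]
  simp

theorem pvGoLe (old : List Char) :
    ∀ (fuel : Nat) (l acc : List Char),
      (PySem.Chars.replace.go old [] fuel l acc).length ≤ acc.length + l.length := by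
  intro fuel
  induction fuel with
  | zero => intro l acc; simp [PySem.Chars.replace.go]
  | succ n ih =>
    intro l acc
    cases l with
    | nil => simp [PySem.Chars.replace.go]
    | cons c t =>
      simp only [PySem.Chars.replace.go]
      split
      · simp only [List.reverse_nil, List.nil_append]
        have := ih (List.drop old.length (c :: t)) acc
        simp only [List.length_drop, List.length_cons] at this ⊢
        omega
      · have := ih t (c :: acc)
        simp at this ⊢; omega

theorem pvGoLt (old : List Char) (hne : old ≠ []) :
    ∀ (fuel : Nat) (l acc : List Char), l.length ≤ fuel → old <:+: l →
      (PySem.Chars.replace.go old [] fuel l acc).length < acc.length + l.length := by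
  intro fuel
  induction fuel with
  | zero =>
    intro l acc hl hinf
    interval_cases h : l.length
    · have : l = [] := List.length_eq_zero_iff.mp h
      subst this
      exact absurd (List.eq_nil_of_infix_nil hinf) hne
  | succ n ih =>
    intro l acc hl hinf
    cases l with
    | nil => exact absurd (List.eq_nil_of_infix_nil hinf) hne
    | cons c t =>
      simp only [PySem.Chars.replace.go]
      split
      · rename_i hpre
        have hle := pvGoLe old n (List.drop old.length (c :: t)) acc
        have hol : 0 < old.length := List.length_pos_iff.mpr hne
        have hop : old.length ≤ (c :: t).length := (List.IsPrefix.length_le (by simpa using hpre))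
        simp at hle ⊢; omega
      · rename_i hpre
        have hinf' : old <:+: t := by
          rcases (List.infix_cons_iff.mp hinf) with h | h
          · exact absurd (by simpa using h) (by simpa using hpre)
          · exact h
        have := ih t (c :: acc) (by simp at hl ⊢; omega) hinf'
        simp at this ⊢; omega

theorem pvReplaceLt (old s : List Char) (hne : old ≠ []) (hinf : old <:+: s) :
    (PySem.Chars.replace s old []).length < s.length := by
  have : old.isEmpty = false := by simpa [List.isEmpty_iff]
  simpa [PySem.Chars.replace, this] using pvGoLt old hne s.length s [] le_rfl hinf

-- generic facts about a fold whose body either keeps the state or strictly shrinks it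
theorem pvFoldLe (g : List Char → Int → List Char)
    (hg : ∀ st i, g st i = st ∨ (g st i).length < st.length) :
    ∀ (l : List Int) (st : List Char), (l.foldl g st).length ≤ st.length := by
  intro l
  induction l with
  | nil => simp
  | cons a l ih =>
    intro st
    rcases hg st a with h | h
    · simpa [h] using ih st
    · calc (List.foldl g (g st a) l).length ≤ (g st a).length := ih _
        _ ≤ st.length := le_of_lt h

theorem pvFoldEqOrLt (g : List Char → Int → List Char)
    (hg : ∀ st i, g st i = st ∨ (g st i).length < st.length) :
    ∀ (l : List Int) (st : List Char), l.foldl g st = st ∨ (l.foldl g st).length < st.length := by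
  intro l
  induction l with
  | nil => intro st; left; rfl
  | cons a l ih =>
    intro st
    rcases hg st a with h | h
    · rw [List.foldl_cons, h]; exact ih st
    · right
      calc (List.foldl g (g st a) l).length ≤ (g st a).length := pvFoldLe g hg l _
        _ < st.length := h

theorem pvFoldAllId (g : List Char → Int → List Char)
    (hg : ∀ st i, g st i = st ∨ (g st i).length < st.length) :
    ∀ (l : List Int) (st : List Char), l.foldl g st = st → ∀ i ∈ l, g st i = st := by
  intro l
  induction l with
  | nil => intro st _ i hi; simp at hi
  | cons a l ih =>
    intro st hfold i hi
    rcases hg st a with h | h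
    · rw [List.foldl_cons, h] at hfold
      rcases List.mem_cons.mp hi with rfl | hi'
      · exact h
      · exact ih st hfold i hi'
    · exfalso
      have : (List.foldl g (g st a) l).length ≤ (g st a).length := pvFoldLe g hg l _
      rw [List.foldl_cons] at hfold
      rw [hfold] at this
      omega

theorem pvBody1Shrink : ∀ (st : List Char) (i : Int),
    pvBody1 st i = st ∨ (pvBody1 st i).length < st.length := by
  intro st i
  unfold pvBody1
  split
  · rename_i h
    right
    exact pvReplaceLt _ _ (by simp) (h ▸ pvSliceInfix st i (i + 2))
  · split
    · rename_i _ h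
      right
      exact pvReplaceLt _ _ (by simp) (h ▸ pvSliceInfix st i (i + 2))
    · left; rfl

theorem pvBody2Shrink : ∀ (st : List Char) (i : Int),
    pvBody2 st i = st ∨ (pvBody2 st i).length < st.length := by
  intro st i
  unfold pvBody2
  split
  · rename_i h
    right
    exact pvReplaceLt _ _ (by simp) (h ▸ pvSliceInfix st i (i + 3))
  · left; rfl

-- if an occurrence survives a full pass, the pass strictly shrank the string
theorem pvPass1Lt (s : List Char)
    (h : (PySem.Chars.isIn ['p', 'i'] (pvPass1 s) || PySem.Chars.isIn ['k', 'a'] (pvPass1 s)) = true) :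
    (pvPass1 s).length < s.length := by
  rcases pvFoldEqOrLt pvBody1 pvBody1Shrink (PySem.List.pyRange 0 s.length 1) s with heq | hlt
  · exfalso
    unfold pvPass1 at h
    rw [heq] at h
    have hocc : (['p', 'i'] <:+: s) ∨ (['k', 'a'] <:+: s) := by
      rcases Bool.or_eq_true_iff.mp h with h1 | h1
      · exact Or.inl ((PySem.Chars.isIn_iff_infix _ _).mp h1)
      · exact Or.inr ((PySem.Chars.isIn_iff_infix _ _).mp h1)
    rcases hocc with ⟨u, v, huv⟩ | ⟨u, v, huv⟩
    · have hlen : u.length + 2 ≤ s.length := by rw [← huv]; simp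
      have hmem : ((u.length : Int)) ∈ PySem.List.pyRange 0 s.length 1 := by
        rw [PySem.List.mem_pyRange_one]; omega
      have hid := pvFoldAllId pvBody1 pvBody1Shrink (PySem.List.pyRange 0 s.length 1) s heq
        ((u.length : Int)) hmem
      have hcur := pvSliceAt u ['p', 'i'] v
      rw [huv] at hcur
      norm_num at hcur
      unfold pvBody1 at hid
      rw [hcur, if_pos rfl] at hid
      have := pvReplaceLt ['p', 'i'] s (by simp) ⟨u, v, huv⟩
      have hl2 := congrArg List.length hid
      omega
    · have hlen : u.length + 2 ≤ s.length := by rw [← huv]; simp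
      have hmem : ((u.length : Int)) ∈ PySem.List.pyRange 0 s.length 1 := by
        rw [PySem.List.mem_pyRange_one]; omega
      have hid := pvFoldAllId pvBody1 pvBody1Shrink (PySem.List.pyRange 0 s.length 1) s heq
        ((u.length : Int)) hmem
      have hcur := pvSliceAt u ['k', 'a'] v
      rw [huv] at hcur
      norm_num at hcur
      unfold pvBody1 at hid
      rw [hcur, if_neg (by simp), if_pos rfl] at hid
      have := pvReplaceLt ['k', 'a'] s (by simp) ⟨u, v, huv⟩
      have hl2 := congrArg List.length hid
      omega
  · exact hlt

theorem pvPass2Lt (s : List Char)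
    (h : PySem.Chars.isIn ['c', 'h', 'u'] (pvPass2 s) = true) :
    (pvPass2 s).length < s.length := by
  rcases pvFoldEqOrLt pvBody2 pvBody2Shrink (PySem.List.pyRange 0 s.length 1) s with heq | hlt
  · exfalso
    unfold pvPass2 at h
    rw [heq] at h
    obtain ⟨u, v, huv⟩ := (PySem.Chars.isIn_iff_infix _ _).mp h
    have hlen : u.length + 3 ≤ s.length := by rw [← huv]; simp
    have hmem : ((u.length : Int)) ∈ PySem.List.pyRange 0 s.length 1 := by
      rw [PySem.List.mem_pyRange_one]; omega
    have hid := pvFoldAllId pvBody2 pvBody2Shrink (PySem.List.pyRange 0 s.length 1) s heq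
      ((u.length : Int)) hmem
    have hcur := pvSliceAt u ['c', 'h', 'u'] v
    rw [huv] at hcur
    norm_num at hcur
    unfold pvBody2 at hid
    rw [hcur, if_pos rfl] at hid
    have := pvReplaceLt ['c', 'h', 'u'] s (by simp) ⟨u, v, huv⟩
    have hl2 := congrArg List.length hid
    omega
  · exact hlt

-- while True: one for-pass, then continue while 'pi'/'ka' remains
def pvLoop1 (str : List Char) : List Char :=
  let str' := pvPass1 str
  if hcont : (PySem.Chars.isIn ['p', 'i'] str' || PySem.Chars.isIn ['k', 'a'] str') = true then
    pvLoop1 str'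
  else
    str'
termination_by str.length
decreasing_by exact pvPass1Lt str hcont

def pvLoop2 (str : List Char) : List Char :=
  let str' := pvPass2 str
  if hcont : PySem.Chars.isIn ['c', 'h', 'u'] str' = true then
    pvLoop2 str'
  else
    str'
termination_by str.length
decreasing_by exact pvPass2Lt str hcont

def check (word : String) : String :=
  -- value = '' in A is dead; str = word
  let str := word.toList
  let str1 := pvLoop1 str
  let str2 := pvLoop2 str1
  if str2.length = 0 then "YES" else "NO"

-- ===== PORT B =====
-- B-side helpers: the two stack steps of Source B (stack kept reversed: head = top)
def pvStep1 (st : List Char) (ch : Char) : List Char :=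
  match st with
  | p :: t =>
    if ch = 'i' ∧ p = 'p' then t
    else if ch = 'a' ∧ p = 'k' then t
    else ch :: st
  | [] => [ch]

def pvStep2 (st2 : List Char) (ch : Char) : List Char :=
  match st2 with
  | a :: b :: t => if ch = 'u' ∧ a = 'h' ∧ b = 'c' then t else ch :: st2
  | _ => ch :: st2

def check_alt (word : String) : String :=
  let st := (word.toList.foldl pvStep1 []).reverse
  let st2 := (st.foldl pvStep2 []).reverse
  if st2.isEmpty then "YES" else "NO"

-- ===== PRECONDITION & SPEC =====
def Spec_check (word : String) (out : String) : Prop := out = check_alt word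
instance (word : String) (out : String) : Decidable (Spec_check word out) := by unfold Spec_check; infer_instance

-- ===== CLAIM (what is proved, stated in full; the proofs are below) =====
def Claim_equal_check : Prop := ∀ (word : String), Dom_check word → Spec_check word (check word)

-- ===== LEMMAS AND PROOFS =====

-- deleting one occurrence of 'pi' / 'ka' / 'chu' does not change the stack fold
theorem pvCancel1pi : ∀ (w : List Char), List.foldl pvStep1 w ['p', 'i'] = w := by
  intro w; cases w <;> simp [pvStep1]

theorem pvCancel1ka : ∀ (w : List Char), List.foldl pvStep1 w ['k', 'a'] = w := by
  intro w; cases w <;> simp [pvStep1]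

theorem pvCancel2chu : ∀ (w : List Char), List.foldl pvStep2 w ['c', 'h', 'u'] = w := by
  intro w; cases w with
  | nil => simp [pvStep2]
  | cons a t => cases t <;> simp [pvStep2]

-- str.replace(old, '') does not change the stack fold when old cancels
theorem pvGoFoldInv (step : List Char → Char → List Char) (old : List Char)
    (hc : ∀ w, List.foldl step w old = w) (hne : old ≠ []) :
    ∀ (fuel : Nat) (l acc : List Char) (st : List Char), l.length ≤ fuel →
      List.foldl step st (PySem.Chars.replace.go old [] fuel l acc) =
        List.foldl step st (acc.reverse ++ l) := by
  intro fuel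
  induction fuel with
  | zero =>
    intro l acc st hl
    have : l = [] := List.length_eq_zero_iff.mp (by omega)
    subst this
    simp [PySem.Chars.replace.go]
  | succ n ih =>
    intro l acc st hl
    cases l with
    | nil => simp [PySem.Chars.replace.go]
    | cons c t =>
      simp only [PySem.Chars.replace.go]
      split
      · rename_i hpre
        have hpre' : old <+: (c :: t) := by simpa using hpre
        obtain ⟨rest, hrest⟩ := hpre'
        have hd : List.drop old.length (c :: t) = rest := by
          rw [← hrest]; simp
        have hol : 0 < old.length := List.length_pos_iff.mpr hne
        rw [ih _ _ st (by rw [hd]; have h1 := congrArg List.length hrest; simp only [List.length_append, List.length_cons] at h1 hl; omega)]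
        rw [hd, ← hrest]
        simp only [List.reverse_nil, List.nil_append, ← List.append_assoc]
        rw [List.foldl_append, List.foldl_append, List.foldl_append, hc]
      · rw [ih t (c :: acc) st (by simp at hl ⊢; omega)]
        simp

theorem pvReplaceFoldInv (step : List Char → Char → List Char) (old : List Char)
    (hc : ∀ w, List.foldl step w old = w) (hne : old ≠ []) (s : List Char) (st : List Char) :
    List.foldl step st (PySem.Chars.replace s old []) = List.foldl step st s := by
  have : old.isEmpty = false := by simpa [List.isEmpty_iff]
  simpa [PySem.Chars.replace, this] using pvGoFoldInv step old hc hne s.length s [] st le_rfl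

-- the for-pass preserves the stack fold
theorem pvPassFoldInv (step : List Char → Char → List Char)
    (g : List Char → Int → List Char)
    (hg : ∀ (x : List Char) (i : Int) (st : List Char),
      List.foldl step st (g x i) = List.foldl step st x) :
    ∀ (l : List Int) (s st : List Char),
      List.foldl step st (l.foldl g s) = List.foldl step st s := by
  intro l
  induction l with
  | nil => intro s st; rfl
  | cons a l ih =>
    intro s st
    rw [List.foldl_cons, ih, hg]

theorem pvBody1FoldInv : ∀ (x : List Char) (i : Int) (st : List Char),
    List.foldl pvStep1 st (pvBody1 x i) = List.foldl pvStep1 st x := by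
  intro x i st
  unfold pvBody1
  split
  · exact pvReplaceFoldInv pvStep1 ['p', 'i'] pvCancel1pi (by simp) x st
  · split
    · exact pvReplaceFoldInv pvStep1 ['k', 'a'] pvCancel1ka (by simp) x st
    · rfl

theorem pvBody2FoldInv : ∀ (x : List Char) (i : Int) (st : List Char),
    List.foldl pvStep2 st (pvBody2 x i) = List.foldl pvStep2 st x := by
  intro x i st
  unfold pvBody2
  split
  · exact pvReplaceFoldInv pvStep2 ['c', 'h', 'u'] pvCancel2chu (by simp) x st
  · rfl

-- the while loop preserves the stack fold
theorem pvLoop1FoldInv : ∀ (s st : List Char),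
    List.foldl pvStep1 st (pvLoop1 s) = List.foldl pvStep1 st s := by
  intro s
  induction s using pvLoop1.induct with
  | case1 s str' hcond ih =>
    intro st
    rw [pvLoop1]
    split
    · exact (ih st).trans (pvPassFoldInv pvStep1 pvBody1 pvBody1FoldInv _ s st)
    · rename_i h'; exact absurd hcond h'
  | case2 s str' hcond =>
    intro st
    rw [pvLoop1]
    split
    · rename_i h'; exact absurd h' hcond
    · exact pvPassFoldInv pvStep1 pvBody1 pvBody1FoldInv _ s st

theorem pvLoop2FoldInv : ∀ (s st : List Char),
    List.foldl pvStep2 st (pvLoop2 s) = List.foldl pvStep2 st s := by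
  intro s
  induction s using pvLoop2.induct with
  | case1 s str' hcond ih =>
    intro st
    rw [pvLoop2]
    split
    · exact (ih st).trans (pvPassFoldInv pvStep2 pvBody2 pvBody2FoldInv _ s st)
    · rename_i h'; exact absurd hcond h'
  | case2 s str' hcond =>
    intro st
    rw [pvLoop2]
    split
    · rename_i h'; exact absurd h' hcond
    · exact pvPassFoldInv pvStep2 pvBody2 pvBody2FoldInv _ s st

-- the loops stop only on strings without an occurrence
theorem pvLoop1NoOcc : ∀ (s : List Char),
    ¬ (['p', 'i'] <:+: pvLoop1 s) ∧ ¬ (['k', 'a'] <:+: pvLoop1 s) := by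
  intro s
  induction s using pvLoop1.induct with
  | case1 s str' hcond ih =>
    rw [pvLoop1]
    split
    · exact ih
    · rename_i h'; exact absurd hcond h'
  | case2 s str' hcond =>
    rw [pvLoop1]
    split
    · rename_i h'; exact absurd h' hcond
    · simp only [Bool.or_eq_true, not_or, Bool.not_eq_true] at hcond
      exact ⟨(PySem.Chars.isIn_eq_false_iff _ _).mp hcond.1,
             (PySem.Chars.isIn_eq_false_iff _ _).mp hcond.2⟩

theorem pvLoop2NoOcc : ∀ (s : List Char), ¬ (['c', 'h', 'u'] <:+: pvLoop2 s) := by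
  intro s
  induction s using pvLoop2.induct with
  | case1 s str' hcond ih =>
    rw [pvLoop2]
    split
    · exact ih
    · rename_i h'; exact absurd hcond h'
  | case2 s str' hcond =>
    rw [pvLoop2]
    split
    · rename_i h'; exact absurd h' hcond
    · exact (PySem.Chars.isIn_eq_false_iff _ _).mp (Bool.not_eq_true _ ▸ hcond)

-- on an occurrence-free string the stack fold is the identity
theorem pvIrred1 : ∀ (s st : List Char),
    ¬ (['p', 'i'] <:+: (st.reverse ++ s)) → ¬ (['k', 'a'] <:+: (st.reverse ++ s)) →
      List.foldl pvStep1 st s = (st.reverse ++ s).reverse := by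
  intro s
  induction s with
  | nil => intro st _ _; simp
  | cons c t ih =>
    intro st hpi hka
    rw [List.foldl_cons]
    have hpush : pvStep1 st c = c :: st := by
      cases st with
      | nil => rfl
      | cons p t' =>
        simp only [pvStep1]
        rw [if_neg, if_neg]
        · rintro ⟨rfl, rfl⟩
          exact hka ⟨t'.reverse, t, by simp⟩
        · rintro ⟨rfl, rfl⟩
          exact hpi ⟨t'.reverse, t, by simp⟩
    rw [hpush]
    have := ih (c :: st) (by simpa using hpi) (by simpa using hka)
    simpa using this

theorem pvIrred2 : ∀ (s st : List Char),
    ¬ (['c', 'h', 'u'] <:+: (st.reverse ++ s)) →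
      List.foldl pvStep2 st s = (st.reverse ++ s).reverse := by
  intro s
  induction s with
  | nil => intro st _; simp
  | cons c t ih =>
    intro st hchu
    rw [List.foldl_cons]
    have hpush : pvStep2 st c = c :: st := by
      cases st with
      | nil => rfl
      | cons a t' =>
        cases t' with
        | nil => rfl
        | cons b t'' =>
          simp only [pvStep2]
          rw [if_neg]
          rintro ⟨rfl, rfl, rfl⟩
          exact hchu ⟨t''.reverse, t, by simp⟩
    rw [hpush]
    have := ih (c :: st) (by simpa using hchu)
    simpa using this

-- the whole first phase of A equals B's first stack pass (and likewise the second)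
theorem pvLoop1Eq (s : List Char) : pvLoop1 s = (List.foldl pvStep1 [] s).reverse := by
  have h1 := pvLoop1FoldInv s []
  obtain ⟨hpi, hka⟩ := pvLoop1NoOcc s
  have h2 := pvIrred1 (pvLoop1 s) [] (by simpa using hpi) (by simpa using hka)
  simp only [List.reverse_nil, List.nil_append] at h2
  rw [h2] at h1
  rw [← h1, List.reverse_reverse]

theorem pvLoop2Eq (s : List Char) : pvLoop2 s = (List.foldl pvStep2 [] s).reverse := by
  have h1 := pvLoop2FoldInv s []
  have h2 := pvIrred2 (pvLoop2 s) [] (by simpa using pvLoop2NoOcc s)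
  simp only [List.reverse_nil, List.nil_append] at h2
  rw [h2] at h1
  rw [← h1, List.reverse_reverse]

-- ===== VERDICT (by name: the statement is the Claim_ definition above) =====
theorem check_spec : Claim_equal_check := by
  intro word _
  unfold Spec_check check check_alt
  simp only [pvLoop1Eq, pvLoop2Eq]
  simp [List.isEmpty_iff, List.length_eq_zero_iff]
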